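-- pv_equiv track=rewrite | github.com/rishabh1005/Algorithmic-Toolbox | week5_dynamic_programming1/2_primitive_calculator/primitive_calculator.py | solution
-- ===== SOURCE A (Python) =====
-- def solution(n):
--
--     num = [0]*(n+1)
--     for i in range(1,n+1):
--         num[i] = num[i-1]+1
--         if i%2==0:
--             num[i] = min(num[i//2]+1,num[i])
--         if i%3==0:
--             num[i] = min(num[i//3]+1,num[i])
--     return num
-- ===== SOURCE B (Python) =====
-- def solution(n):
--     # Breadth-first search from node 0 over the edges v -> v+1, 2*v, 3*v:
--     # a queue-driven shortest-path traversal instead of A's index-sweep DP.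
--     if n < 0:
--         return []
--     dist = [0] * (n + 1)
--     visited = [False] * (n + 1)
--     visited[0] = True
--     queue = [0]
--     head = 0
--     while head < len(queue):
--         v = queue[head]
--         head += 1
--         d = dist[v] + 1
--         for w in (v + 1, 2 * v, 3 * v):
--             if w <= n and not visited[w]:
--                 visited[w] = True
--                 dist[w] = d
--                 queue.append(w)
--     return dist
-- ===== Notes on version B (the rewrite author's own statement) =====
-- stated objective: alternative
-- what changed: Replaces the bottom-up DP table sweep (each i takes the min over its pull-predecessors i-1, i//2, i//3) by a breadth-first search from the start node over the out-edges v->v+1, 2*v, 3*v, driven by an explicit FIFO queue with a visited array; BFS layer order guarantees that the first time a node is discovered its distance is minimal, which equals A's DP value.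
import Mathlib
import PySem

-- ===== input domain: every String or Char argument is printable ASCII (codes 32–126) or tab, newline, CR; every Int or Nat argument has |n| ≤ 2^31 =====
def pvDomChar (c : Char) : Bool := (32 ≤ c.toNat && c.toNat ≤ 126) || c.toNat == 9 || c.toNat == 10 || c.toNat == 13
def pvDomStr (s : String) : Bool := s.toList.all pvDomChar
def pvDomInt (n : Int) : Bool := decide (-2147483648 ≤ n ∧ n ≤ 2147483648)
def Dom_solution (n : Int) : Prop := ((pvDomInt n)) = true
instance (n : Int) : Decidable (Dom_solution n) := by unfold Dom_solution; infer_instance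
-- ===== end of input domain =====

-- B replaces A's bottom-up DP sweep by a queue-driven breadth-first search from
-- the start node over the edges v -> v+1, 2v, 3v (objective: alternative).

-- ===== PORT A =====
-- literal port of A: num = [0]*(n+1); for i in range(1, n+1): pull-recurrence updates
def solution (n : Int) : List Int :=
  let num := PySem.List.pyRepeat [(0 : Int)] (n + 1)
  (PySem.List.pyRange 1 (n + 1) 1).foldl (fun num i =>
    let num := PySem.List.pySetD num i (PySem.List.pyGetD num (i - 1) 0 + 1)
    let num := if PySem.Int.mod i 2 = 0 then
        PySem.List.pySetD num i (min (PySem.List.pyGetD num (PySem.Int.floordiv i 2) 0 + 1) (PySem.List.pyGetD num i 0))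
      else num
    let num := if PySem.Int.mod i 3 = 0 then
        PySem.List.pySetD num i (min (PySem.List.pyGetD num (PySem.Int.floordiv i 3) 0 + 1) (PySem.List.pyGetD num i 0))
      else num
    num) num

-- ===== PORT B =====
-- port of Source B: BFS over edges v -> v+1, 2v, 3v with a FIFO queue and visited array.
-- bfsRelax is the body of `for w in (v+1, 2*v, 3*v): if w <= n and not visited[w]: …`
-- on the state (dist, visited, queue).
def bfsRelax (n d : Int) (st : List Int × List Bool × List Int) (w : Int) :
    List Int × List Bool × List Int :=
  if w ≤ n ∧ PySem.List.pyGetD st.2.1 w false = false then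
    (PySem.List.pySetD st.1 w d, PySem.List.pySetD st.2.1 w true, st.2.2 ++ [w])
  else st

-- the Python `while head < len(queue)` loop; `fuel` is only a totality guard:
-- the loop runs at most n.toNat+2 times (queue holds distinct ints of [0,n]),
-- which the equivalence proof below establishes, so the guard never truncates.
def bfsLoop (n : Int) (fuel : Nat) (dist : List Int) (visited : List Bool)
    (queue : List Int) (head : Nat) : List Int :=
  match fuel with
  | 0 => dist
  | Nat.succ fuel =>
    if head < queue.length then
      let v := PySem.List.pyGetD queue (head : Int) 0
      let d := PySem.List.pyGetD dist v 0 + 1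
      let st := [v + 1, 2 * v, 3 * v].foldl (bfsRelax n d) (dist, visited, queue)
      bfsLoop n fuel st.1 st.2.1 st.2.2 (head + 1)
    else dist

def solution_alt (n : Int) : List Int :=
  if n < 0 then []
  else
    bfsLoop n (n.toNat + 2) (PySem.List.pyRepeat [(0 : Int)] (n + 1))
      (PySem.List.pySetD (PySem.List.pyRepeat [false] (n + 1)) 0 true) [0] 0

-- ===== PRECONDITION & SPEC =====
def Spec_solution (n : Int) (out : List Int) : Prop := out = solution_alt n
instance (n : Int) (out : List Int) : Decidable (Spec_solution n out) := by unfold Spec_solution; infer_instance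

-- ===== CLAIM (what is proved, stated in full; the proofs are below) =====
def Claim_equal_solution : Prop := ∀ (n : Int), Dom_solution n → Spec_solution n (solution n)

-- ===== LEMMAS AND PROOFS =====

-- the common specification value: minimal number of +1/×2/×3 steps to reach i from 0 (A's recurrence)
def fmin : Nat → Int
  | 0 => 0
  | (i+1) =>
    let a := fmin i + 1
    let a := if (i+1) % 2 = 0 then min (fmin ((i+1)/2) + 1) a else a
    if (i+1) % 3 = 0 then min (fmin ((i+1)/3) + 1) a else a
  termination_by i => i
  decreasing_by all_goals omega

lemma fmin_nonneg (j : Nat) : 0 ≤ fmin j := by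
  induction j using Nat.strong_induction_on with
  | _ j ih =>
    match j with
    | 0 => simp [fmin]
    | (i+1) =>
      rw [fmin]
      have h1 := ih i (by omega)
      have h2 := ih ((i+1)/2) (by omega)
      have h3 := ih ((i+1)/3) (by omega)
      split_ifs <;> omega

-- list of g 0, …, g (m-1)
def mr (m : Nat) (g : Nat → Int) : List Int := (List.range m).map g

lemma mr_getD (m t : Nat) (g : Nat → Int) (d : Int) (h : t < m) : (mr m g).getD t d = g t := by
  simp [mr, List.getD, List.getElem?_map, List.getElem?_range h]

lemma mr_set (m t : Nat) (g : Nat → Int) (v : Int) :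
    (mr m g).set t v = mr m (fun j => if j = t then v else g j) := by
  apply List.ext_getElem
  · simp [mr]
  · intro i h1 h2
    simp only [mr, List.length_map, List.length_range] at h1 h2 ⊢
    rw [List.getElem_set]
    simp only [List.getElem_map, List.getElem_range]
    by_cases ht : t = i
    · subst ht; simp
    · simp [ht, Ne.symm ht]

lemma mr_congr (m : Nat) (g g' : Nat → Int) (h : ∀ j, j < m → g j = g' j) : mr m g = mr m g' := by
  apply List.map_congr_left
  intro j hj
  exact h j (List.mem_range.mp hj)

lemma mr_getD' (m t : Nat) (g : Nat → Int) (d : Int) : (mr m g).getD t d = if t < m then g t else d := by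
  by_cases h : t < m
  · rw [mr_getD _ _ _ _ h, if_pos h]
  · rw [if_neg h]
    simp only [mr, List.getD, List.getElem?_map]
    rw [List.getElem?_eq_none (by simpa using Nat.le_of_not_lt h)]
    rfl

-- A's loop invariant shape
def gA (k j : Nat) : Int := if j ≤ k then fmin j else 0

-- the loop body of A, named for the proofs (definitionally the lambda in `solution`)
def stepA (num : List Int) (i : Int) : List Int :=
  let num := PySem.List.pySetD num i (PySem.List.pyGetD num (i - 1) 0 + 1)
  let num := if PySem.Int.mod i 2 = 0 then
      PySem.List.pySetD num i (min (PySem.List.pyGetD num (PySem.Int.floordiv i 2) 0 + 1) (PySem.List.pyGetD num i 0))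
    else num
  let num := if PySem.Int.mod i 3 = 0 then
      PySem.List.pySetD num i (min (PySem.List.pyGetD num (PySem.Int.floordiv i 3) 0 + 1) (PySem.List.pyGetD num i 0))
    else num
  num

lemma stepA_mr (n : Int) (k : Nat) (hk : k < n.toNat) :
    stepA (mr (n.toNat + 1) (gA k)) ((k : Int) + 1) = mr (n.toNat + 1) (gA (k + 1)) := by
  have e2 : ((k : Int) + 1) = (((k + 1 : Nat)) : Int) := by push_cast; ring
  have e1 : (((k + 1 : Nat)) : Int) - 1 = ((k : Nat) : Int) := by push_cast; ring
  have m2 : PySem.Int.mod (((k + 1 : Nat)) : Int) 2 = (((k + 1) % 2 : Nat) : Int) := by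
    exact_mod_cast PySem.Int.mod_natCast (k + 1) 2
  have m3 : PySem.Int.mod (((k + 1 : Nat)) : Int) 3 = (((k + 1) % 3 : Nat) : Int) := by
    exact_mod_cast PySem.Int.mod_natCast (k + 1) 3
  have d2 : PySem.Int.floordiv (((k + 1 : Nat)) : Int) 2 = (((k + 1) / 2 : Nat) : Int) := by
    exact_mod_cast PySem.Int.floordiv_natCast (k + 1) 2
  have d3 : PySem.Int.floordiv (((k + 1 : Nat)) : Int) 3 = (((k + 1) / 3 : Nat) : Int) := by
    exact_mod_cast PySem.Int.floordiv_natCast (k + 1) 3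
  have hlt : k < n.toNat + 1 := by omega
  have hlt1 : k + 1 < n.toNat + 1 := by omega
  have hlt2 : (k + 1) / 2 < n.toNat + 1 := by omega
  have hlt3 : (k + 1) / 3 < n.toNat + 1 := by omega
  have ne2 : ¬ ((k + 1) / 2 = k + 1) := by omega
  have ne3 : ¬ ((k + 1) / 3 = k + 1) := by omega
  have le2 : (k + 1) / 2 ≤ k := by omega
  have le3 : (k + 1) / 3 ≤ k := by omega
  have ga2 : gA k ((k + 1) / 2) = fmin ((k + 1) / 2) := by simp [gA, le2]
  have ga3 : gA k ((k + 1) / 3) = fmin ((k + 1) / 3) := by simp [gA, le3]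
  have gak : gA k k = fmin k := by simp [gA]
  have gfin : ∀ j, j < n.toNat + 1 → ¬ (j = k + 1) → gA (k + 1) j = gA k j := by
    intro j _ hj'
    simp only [gA]
    split_ifs <;> first | rfl | omega
  have gtop : gA (k + 1) (k + 1) = fmin (k + 1) := by simp [gA]
  by_cases h2 : (k + 1) % 2 = 0 <;> by_cases h3 : (k + 1) % 3 = 0 <;>
  · simp only [stepA, e2, e1, m2, m3, d2, d3, PySem.List.pyGetD_natCast,
      PySem.List.pySetD_natCast, Nat.cast_eq_zero, mr_getD', mr_set, h2, h3,
      hlt, hlt1, hlt2, hlt3, ne2, ne3, ga2, ga3, gak, ite_true, ite_false]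
    apply mr_congr
    intro j hj
    by_cases hj' : j = k + 1
    · subst hj'
      rw [gtop, fmin]
      simp only [h2, h3, ite_true, ite_false]
    · rw [gfin j hj hj']
      simp only [hj', ite_false]

lemma loopA (n : Int) (hn : 0 ≤ n) (k : Nat) (hk : (k : Int) ≤ n) :
    (PySem.List.pyRange 1 (1 + (k : Int)) 1).foldl stepA (mr (n.toNat + 1) (fun _ => 0)) =
      mr (n.toNat + 1) (gA k) := by
  induction k with
  | zero =>
    rw [PySem.List.pyRange_one_eq_nil (by omega)]
    simp only [List.foldl_nil]
    apply mr_congr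
    intro j hj
    simp only [gA]
    split_ifs with h
    · interval_cases j; simp [fmin]
    · rfl
  | succ k ih =>
    have hk' : (k : Int) ≤ n := by push_cast at hk ⊢; omega
    have hsplit : PySem.List.pyRange 1 (1 + ((k : Nat) + 1 : Nat)) 1 =
        PySem.List.pyRange 1 (1 + (k : Int)) 1 ++ [1 + (k : Int)] := by
      have : (1 : Int) + ((k : Nat) + 1 : Nat) = (1 + (k : Int)) + 1 := by push_cast; ring
      rw [this, PySem.List.pyRange_one_succ_right (by omega)]
    push_cast at hsplit ⊢
    rw [hsplit, List.foldl_append, ih hk']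
    simp only [List.foldl_cons, List.foldl_nil]
    have : (1 : Int) + (k : Int) = (k : Int) + 1 := by ring
    rw [this]
    exact stepA_mr n k (by omega)

theorem solution_A_eq (n : Int) (hn : 0 ≤ n) :
    solution n = mr (n.toNat + 1) (fun j => fmin j) := by
  have h0 : solution n = (PySem.List.pyRange 1 (n + 1) 1).foldl stepA
      (PySem.List.pyRepeat [(0 : Int)] (n + 1)) := rfl
  have hrep : PySem.List.pyRepeat [(0 : Int)] (n + 1) = mr (n.toNat + 1) (fun _ => 0) := by
    rw [PySem.List.pyRepeat_singleton]
    have : (n + 1).toNat = n.toNat + 1 := by omega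
    rw [this]
    simp [mr, List.map_const']
  have hr : n + 1 = 1 + ((n.toNat : Nat) : Int) := by omega
  rw [h0, hrep, hr, loopA n hn n.toNat (by omega)]
  apply mr_congr
  intro j hj
  simp only [gA]
  rw [if_pos (by omega)]

-- ===== B-side proof: BFS distances equal fmin =====

-- fmin read at an Int node
def fI (x : Int) : Int := fmin x.toNat

lemma fI_nonneg (x : Int) : 0 ≤ fI x := fmin_nonneg _

-- forward edges: one operation away
lemma fmin_succ_le (m : Nat) : fmin (m + 1) ≤ fmin m + 1 := by
  rw [fmin]
  split_ifs <;> first | (simp only [min_le_iff]; omega) | omega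

lemma fmin_two_mul_le (m : Nat) : fmin (2 * m) ≤ fmin m + 1 := by
  match m with
  | 0 => rw [show (2:Nat) * 0 = 0 from rfl]; linarith
  | (k+1) =>
    obtain ⟨i, hi⟩ : ∃ i, 2 * (k + 1) = i + 1 := ⟨2 * k + 1, by omega⟩
    rw [hi, fmin]
    have h2 : (i + 1) % 2 = 0 := by omega
    have hq : (i + 1) / 2 = k + 1 := by omega
    rw [if_pos h2, hq]
    split_ifs <;> (simp only [min_le_iff]; omega)

lemma fmin_three_mul_le (m : Nat) : fmin (3 * m) ≤ fmin m + 1 := by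
  match m with
  | 0 => rw [show (3:Nat) * 0 = 0 from rfl]; linarith
  | (k+1) =>
    obtain ⟨i, hi⟩ : ∃ i, 3 * (k + 1) = i + 1 := ⟨3 * k + 2, by omega⟩
    rw [hi, fmin]
    have h3 : (i + 1) % 3 = 0 := by omega
    have hq : (i + 1) / 3 = k + 1 := by omega
    rw [if_pos h3, hq]
    exact min_le_left _ _

-- every node m ≥ 1 has a predecessor p with fmin m = fmin p + 1
lemma fmin_pred_exists (m : Nat) (hm : 1 ≤ m) :
    ∃ p : Nat, (m = p + 1 ∨ m = 2 * p ∨ m = 3 * p) ∧ fmin m = fmin p + 1 := by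
  obtain ⟨i, rfl⟩ : ∃ i, m = i + 1 := ⟨m - 1, by omega⟩
  rw [fmin]
  by_cases h2 : (i + 1) % 2 = 0 <;> by_cases h3 : (i + 1) % 3 = 0 <;>
    simp only [h2, h3, ite_true, ite_false]
  · by_cases hc : fmin ((i+1)/3) + 1 ≤ min (fmin ((i+1)/2) + 1) (fmin i + 1)
    · exact ⟨(i+1)/3, Or.inr (Or.inr (by omega)), by rw [min_eq_left hc]⟩
    · rw [min_eq_right ((not_le.mp hc).le)]
      by_cases hb : fmin ((i+1)/2) + 1 ≤ fmin i + 1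
      · exact ⟨(i+1)/2, Or.inr (Or.inl (by omega)), by rw [min_eq_left hb]⟩
      · exact ⟨i, Or.inl rfl, by rw [min_eq_right ((not_le.mp hb).le)]⟩
  · by_cases hb : fmin ((i+1)/2) + 1 ≤ fmin i + 1
    · exact ⟨(i+1)/2, Or.inr (Or.inl (by omega)), by rw [min_eq_left hb]⟩
    · exact ⟨i, Or.inl rfl, by rw [min_eq_right ((not_le.mp hb).le)]⟩
  · by_cases hc : fmin ((i+1)/3) + 1 ≤ fmin i + 1
    · exact ⟨(i+1)/3, Or.inr (Or.inr (by omega)), by rw [min_eq_left hc]⟩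
    · exact ⟨i, Or.inl rfl, by rw [min_eq_right ((not_le.mp hc).le)]⟩
  · exact ⟨i, Or.inl rfl, rfl⟩

-- the BFS loop invariant
structure BInv (n : Int) (dist : List Int) (vis : List Bool) (q : List Int) (h : Nat) : Prop where
  hn : 0 ≤ n
  hhq : h ≤ q.length
  nodup : q.Nodup
  mem_bdd : ∀ x ∈ q, 0 ≤ x ∧ x ≤ n
  dlen : dist.length = n.toNat + 1
  vlen : vis.length = n.toNat + 1
  hvis : ∀ j : Nat, j ≤ n.toNat → vis.getD j false = decide ((j : Int) ∈ q)
  hdist : ∀ j : Nat, j ≤ n.toNat → dist.getD j 0 = if (j : Int) ∈ q then fmin j else 0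
  sorted : q.Pairwise (fun a b => fI a ≤ fI b)
  spread : ∀ i, h ≤ i → i < q.length → fI (q.getD i 0) ≤ fI (q.getD h 0) + 1
  expanded : ∀ i < h, ∀ w ∈ [q.getD i 0 + 1, 2 * q.getD i 0, 3 * q.getD i 0], w ≤ n → w ∈ q
  closed : ∀ p : Int, 0 ≤ p → p ≤ n → (∃ i, h ≤ i ∧ i < q.length ∧ fI p < fI (q.getD i 0)) → p ∈ q
  zero_mem : (0 : Int) ∈ q

lemma pairwise_getD (q : List Int) (hs : q.Pairwise (fun a b => fI a ≤ fI b))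
    (i j : Nat) (hij : i < j) (hj : j < q.length) :
    fI (q.getD i 0) ≤ fI (q.getD j 0) := by
  rw [List.getD_eq_getElem q 0 (by omega), List.getD_eq_getElem q 0 hj]
  exact List.pairwise_iff_getElem.mp hs i j (by omega) hj hij

lemma qlen_le (n : Int) (q : List Int) (nd : q.Nodup) (hb : ∀ x ∈ q, 0 ≤ x ∧ x ≤ n) :
    q.length ≤ n.toNat + 1 := by
  have hsub : q.toFinset ⊆ Finset.Icc 0 n := by
    intro x hx
    rw [List.mem_toFinset] at hx
    exact Finset.mem_Icc.mpr (hb x hx)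
  have hc := Finset.card_le_card hsub
  rw [List.toFinset_card_of_nodup nd] at hc
  rw [Int.card_Icc] at hc
  omega

lemma fmin_zero : fmin 0 = 0 := by rw [fmin]

lemma getD_mem (l : List Int) (i : Nat) (d : Int) (hi : i < l.length) : l.getD i d ∈ l := by
  rw [List.getD_eq_getElem _ _ hi]; exact List.getElem_mem _

lemma prefix_getD (l₁ l₂ : List Int) (hp : l₁ <+: l₂) (i : Nat) (hi : i < l₁.length) (d : Int) :
    l₂.getD i d = l₁.getD i d := by
  obtain ⟨t, rfl⟩ := hp
  rw [List.getD_eq_getElem _ _ hi, List.getD_eq_getElem _ _ (by rw [List.length_append]; omega),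
    List.getElem_append_left hi]

-- invariant for the intermediate states while one node's three neighbours are relaxed
structure MInv (n d : Int) (q₀ dist : List Int) (vis : List Bool) (q : List Int) : Prop where
  pre : q₀ <+: q
  extra : ∀ x ∈ q, x ∉ q₀ → fI x = d ∧ 0 ≤ x ∧ x ≤ n
  nodup : q.Nodup
  mem_bdd : ∀ x ∈ q, 0 ≤ x ∧ x ≤ n
  dlen : dist.length = n.toNat + 1
  vlen : vis.length = n.toNat + 1
  hvis : ∀ j : Nat, j ≤ n.toNat → vis.getD j false = decide ((j : Int) ∈ q)
  hdist : ∀ j : Nat, j ≤ n.toNat → dist.getD j 0 = if (j : Int) ∈ q then fmin j else 0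
  sorted : q.Pairwise (fun a b => fI a ≤ fI b)

lemma minv_all_le (n d : Int) (q₀ dist : List Int) (vis : List Bool) (q : List Int)
    (hq0le : ∀ a ∈ q₀, fI a ≤ d) (m : MInv n d q₀ dist vis q) :
    ∀ a ∈ q, fI a ≤ d := by
  intro a ha
  by_cases h : a ∈ q₀
  · exact hq0le a h
  · exact le_of_eq (m.extra a ha h).1

lemma relax_minv (n d : Int) (q₀ dist : List Int) (vis : List Bool) (q : List Int)
    (hq0le : ∀ a ∈ q₀, fI a ≤ d)
    (far : ∀ u : Int, 0 ≤ u → u ≤ n → u ∉ q₀ → d ≤ fI u)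
    (m : MInv n d q₀ dist vis q) (w : Int) (hw : 0 ≤ w) (hwle : fI w ≤ d) :
    MInv n d q₀ (bfsRelax n d (dist, vis, q) w).1 (bfsRelax n d (dist, vis, q) w).2.1
      (bfsRelax n d (dist, vis, q) w).2.2 ∧
    q <+: (bfsRelax n d (dist, vis, q) w).2.2 ∧
    (w ≤ n → w ∈ (bfsRelax n d (dist, vis, q) w).2.2) := by
  obtain ⟨wn, rfl⟩ : ∃ wn : Nat, w = (wn : Int) := ⟨w.toNat, (Int.toNat_of_nonneg hw).symm⟩
  unfold bfsRelax
  simp only [PySem.List.pyGetD_natCast, PySem.List.pySetD_natCast]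
  by_cases hcn : (wn : Int) ≤ n ∧ vis.getD wn false = false
  · have hwn_le : (wn : Int) ≤ n := hcn.1
    have hwnn : wn ≤ n.toNat := by omega
    have hnm : ((wn : Int)) ∉ q :=
      of_decide_eq_false ((m.hvis wn hwnn).symm.trans hcn.2)
    have hnq0 : ((wn : Int)) ∉ q₀ := fun h => hnm (m.pre.subset h)
    have hfIw : fI (wn : Int) = d :=
      le_antisymm hwle (far _ (Int.natCast_nonneg wn) hwn_le hnq0)
    have hfmw : fmin wn = d := by
      have : fI (wn : Int) = fmin wn := by simp [fI]
      omega
    rw [if_pos hcn]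
    refine ⟨?_, ⟨[(wn : Int)], rfl⟩, fun _ => by simp⟩
    refine ⟨m.pre.trans ⟨[(wn : Int)], rfl⟩, ?_, ?_, ?_, ?_, ?_, ?_, ?_, ?_⟩
    · intro x hx hxq0
      rcases List.mem_append.mp hx with hx' | hx'
      · exact m.extra x hx' hxq0
      · rw [List.mem_singleton.mp hx']
        exact ⟨hfIw, Int.natCast_nonneg wn, hwn_le⟩
    · rw [List.nodup_append]
      refine ⟨m.nodup, List.nodup_singleton _, ?_⟩
      intro a ha b hb
      simp only [List.mem_singleton] at hb
      subst hb
      exact fun heq => hnm (heq ▸ ha)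
    · intro x hx
      rcases List.mem_append.mp hx with hx' | hx'
      · exact m.mem_bdd x hx'
      · rw [List.mem_singleton.mp hx']
        exact ⟨Int.natCast_nonneg wn, hwn_le⟩
    · rw [List.length_set]; exact m.dlen
    · rw [List.length_set]; exact m.vlen
    · intro j hj
      have hjlen : j < vis.length := by rw [m.vlen]; omega
      rw [List.getD_eq_getElem _ _ (by rw [List.length_set]; omega), List.getElem_set]
      by_cases hjw : wn = j
      · subst hjw; simp
      · rw [if_neg hjw, ← List.getD_eq_getElem _ _ hjlen, m.hvis j hj, decide_eq_decide]
        rw [List.mem_append, List.mem_singleton]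
        have : ¬ ((j : Int) = (wn : Int)) := by
          intro h; exact hjw (by exact_mod_cast h.symm)
        tauto
    · intro j hj
      have hjlen : j < dist.length := by rw [m.dlen]; omega
      rw [List.getD_eq_getElem _ _ (by rw [List.length_set]; omega), List.getElem_set]
      by_cases hjw : wn = j
      · subst hjw
        rw [if_pos rfl, if_pos (by simp)]
        omega
      · rw [if_neg hjw, ← List.getD_eq_getElem _ _ hjlen, m.hdist j hj]
        have : ((j : Int) ∈ q ++ [(wn : Int)]) ↔ ((j : Int) ∈ q) := by
          rw [List.mem_append, List.mem_singleton]
          have : ¬ ((j : Int) = (wn : Int)) := by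
            intro h; exact hjw (by exact_mod_cast h.symm)
          tauto
        simp only [this]
    · rw [List.pairwise_append]
      refine ⟨m.sorted, List.pairwise_singleton _ _, ?_⟩
      intro a ha b hb
      rw [List.mem_singleton.mp hb, hfIw]
      exact minv_all_le n d q₀ dist vis q hq0le m a ha
  · rw [if_neg hcn]
    refine ⟨m, List.prefix_rfl, fun hle => ?_⟩
    have hv : ¬ vis.getD wn false = false := fun h => hcn ⟨hle, h⟩
    have : vis.getD wn false = true := by
      cases h : vis.getD wn false
      · exact absurd h hv
      · rfl
    have := (m.hvis wn (by omega)).symm.trans this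
    exact of_decide_eq_true this

-- the three neighbour edges cost at most one extra operation
lemma fI_succ (v : Int) (hv : 0 ≤ v) : fI (v + 1) ≤ fI v + 1 := by
  show fmin (v + 1).toNat ≤ fmin v.toNat + 1
  rw [show (v + 1).toNat = v.toNat + 1 by omega]
  exact fmin_succ_le v.toNat

lemma fI_two (v : Int) (hv : 0 ≤ v) : fI (2 * v) ≤ fI v + 1 := by
  show fmin (2 * v).toNat ≤ fmin v.toNat + 1
  rw [show (2 * v).toNat = 2 * v.toNat by omega]
  exact fmin_two_mul_le v.toNat

lemma fI_three (v : Int) (hv : 0 ≤ v) : fI (3 * v) ≤ fI v + 1 := by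
  show fmin (3 * v).toNat ≤ fmin v.toNat + 1
  rw [show (3 * v).toNat = 3 * v.toNat by omega]
  exact fmin_three_mul_le v.toNat

-- when v = q[h] is popped, every still-unvisited node is strictly farther than v
lemma pop_far (n : Int) (dist : List Int) (vis : List Bool) (q : List Int) (h : Nat)
    (inv : BInv n dist vis q h) (hh : h < q.length) :
    ∀ u : Int, 0 ≤ u → u ≤ n → u ∉ q → fI (q.getD h 0) + 1 ≤ fI u := by
  intro u hu0 hun hnq
  set v := q.getD h 0 with hv
  by_contra hcon
  rw [not_le] at hcon
  have hule : fI u ≤ fI v := by omega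
  rcases lt_or_eq_of_le hule with hlt | heq
  · exact hnq (inv.closed u hu0 hun ⟨h, le_refl h, hh, hlt⟩)
  · have hu_ne : u ≠ 0 := fun h0 => hnq (h0 ▸ inv.zero_mem)
    have hu1 : 1 ≤ u.toNat := by omega
    obtain ⟨p', hrel, hfe⟩ := fmin_pred_exists u.toNat hu1
    have hplt : p' < u.toNat := by omega
    have hpn : ((p' : Int)) ≤ n := by omega
    have hfp : fI ((p' : Int)) = fmin p' := by simp [fI]
    have hfplt : fI ((p' : Int)) < fI v := by
      have : fI u = fmin u.toNat := rfl
      omega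
    have hpq : ((p' : Int)) ∈ q :=
      inv.closed _ (Int.natCast_nonneg p') hpn ⟨h, le_refl h, hh, hfplt⟩
    obtain ⟨jp, hjp, hjpe⟩ := List.mem_iff_getElem.mp hpq
    have hjph : jp < h := by
      rcases lt_trichotomy jp h with h1 | h1 | h1
      · exact h1
      · exfalso
        have hg : q.getD jp 0 = ((p' : Int)) := by
          rw [List.getD_eq_getElem _ _ hjp, hjpe]
        rw [h1] at hg
        rw [hv, hg] at hfplt
        exact lt_irrefl _ hfplt
      · exfalso
        have := pairwise_getD q inv.sorted h jp h1 hjp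
        rw [List.getD_eq_getElem _ _ hjp, hjpe] at this
        rw [hv] at hfplt
        omega
    have hgd : q.getD jp 0 = ((p' : Int)) := by
      rw [List.getD_eq_getElem _ _ hjp, hjpe]
    have hu_eq : u = (u.toNat : Int) := by omega
    have hmem : u ∈ [q.getD jp 0 + 1, 2 * q.getD jp 0, 3 * q.getD jp 0] := by
      rw [hgd]
      rcases hrel with hr | hr | hr
      · have : u = (p' : Int) + 1 := by omega
        rw [this]; simp
      · have : u = 2 * (p' : Int) := by omega
        rw [this]; simp
      · have : u = 3 * (p' : Int) := by omega
        rw [this]; simp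
    exact hnq (inv.expanded jp hjph u hmem hun)

-- one BFS step (pop v = q[h], relax its three out-edges) preserves the invariant
lemma bfs_step (n : Int) (dist : List Int) (vis : List Bool) (q₀ : List Int) (h : Nat)
    (inv : BInv n dist vis q₀ h) (hh : h < q₀.length) :
    BInv n
      ([q₀.getD h 0 + 1, 2 * q₀.getD h 0, 3 * q₀.getD h 0].foldl
        (bfsRelax n (fI (q₀.getD h 0) + 1)) (dist, vis, q₀)).1
      ([q₀.getD h 0 + 1, 2 * q₀.getD h 0, 3 * q₀.getD h 0].foldl
        (bfsRelax n (fI (q₀.getD h 0) + 1)) (dist, vis, q₀)).2.1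
      ([q₀.getD h 0 + 1, 2 * q₀.getD h 0, 3 * q₀.getD h 0].foldl
        (bfsRelax n (fI (q₀.getD h 0) + 1)) (dist, vis, q₀)).2.2
      (h + 1) := by
  set v := q₀.getD h 0 with hvdef
  set d := fI v + 1 with hddef
  have hv_mem : v ∈ q₀ := getD_mem q₀ h 0 hh
  obtain ⟨hv0, hvn⟩ := inv.mem_bdd v hv_mem
  have hq0le : ∀ a ∈ q₀, fI a ≤ d := by
    intro a ha
    obtain ⟨i, hi, hie⟩ := List.mem_iff_getElem.mp ha
    have hag : q₀.getD i 0 = a := by rw [List.getD_eq_getElem _ _ hi, hie]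
    rcases lt_trichotomy i h with h1 | h1 | h1
    · have := pairwise_getD q₀ inv.sorted i h h1 hh
      rw [hag, ← hvdef] at this
      omega
    · rw [h1] at hag
      rw [← hag, ← hvdef]
      omega
    · have := inv.spread i (by omega) hi
      rw [hag, ← hvdef] at this
      omega
  have far : ∀ u : Int, 0 ≤ u → u ≤ n → u ∉ q₀ → d ≤ fI u := by
    intro u h1 h2 h3
    exact pop_far n dist vis q₀ h inv hh u h1 h2 h3
  have m0 : MInv n d q₀ dist vis q₀ :=
    ⟨List.prefix_rfl, fun x hx hx' => absurd hx hx', inv.nodup, inv.mem_bdd,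
      inv.dlen, inv.vlen, inv.hvis, inv.hdist, inv.sorted⟩
  simp only [List.foldl_cons, List.foldl_nil]
  obtain ⟨m1, p1, w1mem⟩ := relax_minv n d q₀ dist vis q₀ hq0le far m0 (v + 1) (by omega)
    (fI_succ v hv0)
  set st1 := bfsRelax n d (dist, vis, q₀) (v + 1) with hst1
  obtain ⟨m2, p2, w2mem⟩ := relax_minv n d q₀ st1.1 st1.2.1 st1.2.2 hq0le far m1 (2 * v)
    (by omega) (fI_two v hv0)
  set st2 := bfsRelax n d (st1.1, st1.2.1, st1.2.2) (2 * v) with hst2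
  obtain ⟨m3, p3, w3mem⟩ := relax_minv n d q₀ st2.1 st2.2.1 st2.2.2 hq0le far m2 (3 * v)
    (by omega) (fI_three v hv0)
  set st3 := bfsRelax n d (st2.1, st2.2.1, st2.2.2) (3 * v) with hst3
  have all_le3 : ∀ a ∈ st3.2.2, fI a ≤ d := minv_all_le n d q₀ st3.1 st3.2.1 st3.2.2 hq0le m3
  have hpre3 : q₀ <+: st3.2.2 := m3.pre
  have hlen3 : q₀.length ≤ st3.2.2.length := hpre3.length_le
  have hq0getD : ∀ i : Nat, i < q₀.length → st3.2.2.getD i 0 = q₀.getD i 0 := by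
    intro i hi
    exact prefix_getD q₀ st3.2.2 hpre3 i hi 0
  refine ⟨inv.hn, by omega, m3.nodup, m3.mem_bdd, m3.dlen, m3.vlen, m3.hvis, m3.hdist,
    m3.sorted, ?_, ?_, ?_, ?_⟩
  · -- spread
    intro i hi hilen
    have hh1 : h + 1 < st3.2.2.length := by omega
    have hup : fI (st3.2.2.getD i 0) ≤ d := all_le3 _ (getD_mem _ _ _ hilen)
    have hlow : fI v ≤ fI (st3.2.2.getD (h + 1) 0) := by
      by_cases hcase : h + 1 < q₀.length
      · rw [hq0getD (h + 1) hcase]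
        exact pairwise_getD q₀ inv.sorted h (h + 1) (by omega) hcase
      · obtain ⟨t, ht⟩ := hpre3
        set x := st3.2.2.getD (h + 1) 0 with hx
        have hxm : x ∈ st3.2.2 := getD_mem _ _ _ hh1
        have hxt : x ∈ t := by
          have h1 : x = (q₀ ++ t).getD (h + 1) 0 := by rw [ht]
          rw [List.getD_eq_getElem _ _ (by rw [ht]; exact hh1),
            List.getElem_append_right (by omega)] at h1
          rw [h1]
          exact List.getElem_mem _
        have hxnq0 : x ∉ q₀ := by
          intro hmem
          have hnd := m3.nodup
          rw [← ht, List.nodup_append] at hnd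
          exact hnd.2.2 x hmem x hxt rfl
        have := (m3.extra x hxm hxnq0).1
        omega
    omega
  · -- expanded
    intro i hi w hw hwn
    rcases Nat.lt_succ_iff_lt_or_eq.mp hi with h1 | h1
    · have hg : st3.2.2.getD i 0 = q₀.getD i 0 := hq0getD i (by omega)
      rw [hg] at hw
      exact hpre3.subset (inv.expanded i h1 w hw hwn)
    · have hg : st3.2.2.getD i 0 = v := by
        rw [h1]
        exact (hq0getD h hh).trans hvdef.symm
      rw [hg] at hw
      simp only [List.mem_cons, List.not_mem_nil, or_false] at hw
      rcases hw with hw | hw | hw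
      · subst hw
        exact p3.subset (p2.subset (w1mem hwn))
      · subst hw
        exact p3.subset (w2mem hwn)
      · subst hw
        exact w3mem hwn
  · -- closed
    intro p hp0 hpn ⟨i, hhi, hilen, hfip⟩
    have : fI (st3.2.2.getD i 0) ≤ d := all_le3 _ (getD_mem _ _ _ hilen)
    by_cases hpq0 : p ∈ q₀
    · exact hpre3.subset hpq0
    · exact absurd (far p hp0 hpn hpq0) (by omega)
  · exact hpre3.subset inv.zero_mem

-- at loop exit every node 0..n has been enqueued
lemma bfs_complete (n : Int) (dist : List Int) (vis : List Bool) (q : List Int) (h : Nat)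
    (inv : BInv n dist vis q h) (hend : ¬ h < q.length) :
    ∀ j : Nat, j ≤ n.toNat → ((j : Int)) ∈ q := by
  have hhl : h = q.length := by have := inv.hhq; omega
  intro j
  induction j with
  | zero => intro _; exact_mod_cast inv.zero_mem
  | succ j ih =>
    intro hj
    have hjq : ((j : Int)) ∈ q := ih (by omega)
    obtain ⟨i, hi, hie⟩ := List.mem_iff_getElem.mp hjq
    have hg : q.getD i 0 = ((j : Int)) := by rw [List.getD_eq_getElem _ _ hi, hie]
    have hmem : ((j : Int)) + 1 ∈ [q.getD i 0 + 1, 2 * q.getD i 0, 3 * q.getD i 0] := by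
      rw [hg]; simp
    have := inv.expanded i (by omega) (((j : Int)) + 1) hmem (by omega)
    have hc : (((j + 1 : Nat)) : Int) = ((j : Int)) + 1 := by push_cast; ring
    rw [hc]
    exact this

lemma binv_dist_final (n : Int) (dist : List Int) (vis : List Bool) (q : List Int) (h : Nat)
    (inv : BInv n dist vis q h) (hend : ¬ h < q.length) :
    dist = mr (n.toNat + 1) fmin := by
  apply List.ext_getElem
  · rw [inv.dlen]; simp [mr]
  · intro i h1 h2
    simp only [mr, List.length_map, List.length_range] at h2
    simp only [mr, List.getElem_map, List.getElem_range]
    have hmem := bfs_complete n dist vis q h inv hend i (by omega)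
    have := inv.hdist i (by omega)
    rw [if_pos hmem] at this
    rw [← List.getD_eq_getElem _ 0 h1, this]

-- the fuel n.toNat + 2 always suffices: the queue holds distinct ints of [0, n]
lemma bfsLoop_eq (n : Int) (fuel : Nat) :
    ∀ (dist : List Int) (vis : List Bool) (q : List Int) (h : Nat),
      BInv n dist vis q h → n.toNat + 2 ≤ fuel + h →
      bfsLoop n fuel dist vis q h = mr (n.toNat + 1) fmin := by
  induction fuel with
  | zero =>
    intro dist vis q h inv hfuel
    exfalso
    have h1 := inv.hhq
    have h2 := qlen_le n q inv.nodup inv.mem_bdd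
    omega
  | succ fuel ih =>
    intro dist vis q h inv hfuel
    rw [bfsLoop]
    by_cases hh : h < q.length
    · rw [if_pos hh]
      have hgq : PySem.List.pyGetD q ((h : Nat) : Int) 0 = q.getD h 0 :=
        PySem.List.pyGetD_natCast q h 0
      have hvm : q.getD h 0 ∈ q := getD_mem q h 0 hh
      obtain ⟨hv0, hvn⟩ := inv.mem_bdd _ hvm
      have hvt : q.getD h 0 = (((q.getD h 0).toNat : Nat) : Int) := by omega
      have hgd : PySem.List.pyGetD dist (q.getD h 0) 0 = fI (q.getD h 0) := by
        rw [hvt, PySem.List.pyGetD_natCast]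
        have hle : (q.getD h 0).toNat ≤ n.toNat := by omega
        have := inv.hdist (q.getD h 0).toNat hle
        rw [if_pos (by rw [← hvt]; exact hvm)] at this
        rw [this]
        rfl
      simp only [hgq, hgd]
      have hstep := bfs_step n dist vis q h inv hh
      exact ih _ _ _ _ hstep (by omega)
    · rw [if_neg hh]
      exact binv_dist_final n dist vis q h inv hh

-- the initial state satisfies the invariant
lemma binv_init (n : Int) (hn : 0 ≤ n) :
    BInv n (PySem.List.pyRepeat [(0 : Int)] (n + 1))
      (PySem.List.pySetD (PySem.List.pyRepeat [false] (n + 1)) 0 true) [0] 0 := by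
  have hrep : PySem.List.pyRepeat [(0 : Int)] (n + 1) = List.replicate (n.toNat + 1) (0 : Int) := by
    rw [PySem.List.pyRepeat_singleton]
    congr 1
    omega
  have hrepb : PySem.List.pyRepeat [false] (n + 1) = List.replicate (n.toNat + 1) false := by
    rw [PySem.List.pyRepeat_singleton]
    congr 1
    omega
  have hvis0 : PySem.List.pySetD (PySem.List.pyRepeat [false] (n + 1)) 0 true =
      (List.replicate (n.toNat + 1) false).set 0 true := by
    rw [hrepb]
    have : ((0 : Nat) : Int) = (0 : Int) := rfl
    rw [← this, PySem.List.pySetD_natCast]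
  refine ⟨hn, by simp, List.nodup_singleton _, ?_, ?_, ?_, ?_, ?_, ?_, ?_, ?_, ?_, ?_⟩
  · intro x hx
    rw [List.mem_singleton.mp hx]
    exact ⟨le_refl _, hn⟩
  · rw [hrep]; simp
  · rw [hvis0]; simp
  · intro j hj
    rw [hvis0]
    rw [List.getD_eq_getElem _ _ (by simp; omega), List.getElem_set]
    by_cases hj0 : j = 0
    · subst hj0; simp
    · rw [if_neg (fun h => hj0 h.symm), List.getElem_replicate]
      have : ¬ ((j : Int) ∈ [(0 : Int)]) := by
        rw [List.mem_singleton]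
        intro h
        exact hj0 (by exact_mod_cast h)
      simp [this]
  · intro j hj
    rw [hrep]
    rw [List.getD_eq_getElem _ _ (by simp; omega), List.getElem_replicate]
    by_cases hj0 : j = 0
    · subst hj0
      rw [if_pos (by simp), fmin_zero]
    · rw [if_neg (by
        rw [List.mem_singleton]
        intro h
        exact hj0 (by exact_mod_cast h))]
  · exact List.pairwise_singleton _ _
  · intro i hi hilen
    simp only [List.length_singleton] at hilen
    have : i = 0 := by omega
    subst this
    linarith [fI_nonneg ([(0 : Int)].getD 0 0)]
  · intro i hi
    omega
  · intro p hp0 hpn ⟨i, hhi, hilen, hfip⟩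
    exfalso
    simp only [List.length_singleton] at hilen
    have : i = 0 := by omega
    subst this
    have : ([(0 : Int)].getD 0 0) = 0 := rfl
    rw [this] at hfip
    have h1 := fI_nonneg p
    have h2 : fI (0 : Int) = 0 := by
      show fmin (0 : Int).toNat = 0
      rw [show (0 : Int).toNat = 0 from rfl, fmin_zero]
    omega
  · simp

theorem solution_B_eq (n : Int) (hn : 0 ≤ n) :
    solution_alt n = mr (n.toNat + 1) (fun j => fmin j) := by
  rw [solution_alt, if_neg (by omega)]
  exact bfsLoop_eq n (n.toNat + 2) _ _ _ 0 (binv_init n hn) (by omega)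

-- ===== VERDICT (by name: the statement is the Claim_ definition above) =====
theorem solution_spec : Claim_equal_solution := by
  intro n _
  unfold Spec_solution
  by_cases hn : 0 ≤ n
  · rw [solution_A_eq n hn, solution_B_eq n hn]
  · have hneg : n < 0 := by omega
    have h1 : solution n = [] := by
      simp [solution, PySem.List.pyRepeat, PySem.List.pyRange_one_eq_nil (by omega : n + 1 ≤ 1)]
      omega
    have h2 : solution_alt n = [] := by simp [solution_alt, hneg]
    rw [h1, h2]
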